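-- pv_equiv track=rewrite | github.com/TinDang97/reqx | src/utils.py | is_known_http2_host
-- ===== SOURCE A (Python) =====
-- def is_known_http2_host(hostname: str) -> bool:
--     """
--     Check if a hostname is known to support HTTP/2.
--
--     Args:
--         hostname: Hostname to check
--
--     Returns:
--         True if the host is known to support HTTP/2, False otherwise
--     """
--     # List of known hosts that support HTTP/2
--     http2_hosts = [
--         "www.google.com",
--         "github.com",
--         "www.cloudflare.com",
--         "www.facebook.com",
--         "www.youtube.com",
--         "twitter.com",
--         "www.amazon.com",
--         "www.reddit.com",
--         "www.wikipedia.org",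
--     ]
--
--     # Check if hostname matches or is a subdomain of a known host
--     for known_host in http2_hosts:
--         if hostname == known_host or hostname.endswith("." + known_host):
--             return True
--
--     return False
-- ===== SOURCE B (Python) =====
-- _HTTP2_HOSTS = {
--     "www.google.com",
--     "github.com",
--     "www.cloudflare.com",
--     "www.facebook.com",
--     "www.youtube.com",
--     "twitter.com",
--     "www.amazon.com",
--     "www.reddit.com",
--     "www.wikipedia.org",
-- }
--
--
-- def is_known_http2_host(hostname: str) -> bool:
--     # Exact match, or any dot-aligned proper suffix of the hostname is a known host.
--     if hostname in _HTTP2_HOSTS: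
--         return True
--     for i, ch in enumerate(hostname):
--         if ch == '.' and hostname[i + 1:] in _HTTP2_HOSTS:
--             return True
--     return False
-- ===== Notes on version B (the rewrite author's own statement) =====
-- stated objective: alternative
-- what changed: B builds a set of the known hosts once and scans the hostname's own dot-aligned suffixes with O(1) set lookups, instead of A's scan over the host list with an endswith test per host.
import Mathlib
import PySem

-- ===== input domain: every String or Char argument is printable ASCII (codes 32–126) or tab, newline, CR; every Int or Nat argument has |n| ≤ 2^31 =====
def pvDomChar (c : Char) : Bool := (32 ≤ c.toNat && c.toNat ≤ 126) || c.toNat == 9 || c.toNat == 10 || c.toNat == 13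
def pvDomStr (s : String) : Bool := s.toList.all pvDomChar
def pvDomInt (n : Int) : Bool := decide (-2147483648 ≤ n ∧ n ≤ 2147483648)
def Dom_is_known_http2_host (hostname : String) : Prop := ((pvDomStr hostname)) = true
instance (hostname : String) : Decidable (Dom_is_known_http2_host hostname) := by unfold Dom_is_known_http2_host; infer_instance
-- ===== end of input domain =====

-- B scans the hostname's own dot-aligned suffixes against a set of known hosts,
-- instead of A's scan over the host list with an endswith test per host (objective: alternative).

-- ===== PORT A =====
def pvHttp2Hosts : List String :=
  ["www.google.com", "github.com", "www.cloudflare.com", "www.facebook.com",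
   "www.youtube.com", "twitter.com", "www.amazon.com", "www.reddit.com",
   "www.wikipedia.org"]

-- the 'for known_host in http2_hosts' loop with its early return
def pvALoop (hostname : String) : List String → Bool
  | [] => false
  | k :: ks =>
      if hostname == k || PySem.Str.endswith hostname ("." ++ k) then true
      else pvALoop hostname ks

def is_known_http2_host (hostname : String) : Bool :=
  pvALoop hostname pvHttp2Hosts

-- ===== PORT B =====
def pvHttp2Set : PySem.Set String := PySem.Set.ofList pvHttp2Hosts

-- the 'for i, ch in enumerate(hostname)' loop: at position i the remaining
-- characters after ch are exactly hostname[i+1:]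
def pvBLoop (s : PySem.Set String) : List Char → Bool
  | [] => false
  | c :: rest =>
      if c == '.' && PySem.Set.contains s (String.ofList rest) then true
      else pvBLoop s rest

def is_known_http2_host_alt (hostname : String) : Bool :=
  if PySem.Set.contains pvHttp2Set hostname then true
  else pvBLoop pvHttp2Set hostname.toList

-- ===== PRECONDITION & SPEC =====
def Spec_is_known_http2_host (hostname : String) (out : Bool) : Prop := out = is_known_http2_host_alt hostname
instance (hostname : String) (out : Bool) : Decidable (Spec_is_known_http2_host hostname out) := by unfold Spec_is_known_http2_host; infer_instance

-- ===== CLAIM (what is proved, stated in full; the proofs are below) =====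
def Claim_equal_is_known_http2_host : Prop := ∀ (hostname : String), Dom_is_known_http2_host hostname → Spec_is_known_http2_host hostname (is_known_http2_host hostname)

-- ===== LEMMAS AND PROOFS =====

theorem pvALoop_iff (hostname : String) (ks : List String) :
    pvALoop hostname ks = true ↔
      ∃ k ∈ ks, hostname = k ∨ ('.' :: k.toList) <:+ hostname.toList := by
  induction ks with
  | nil => simp [pvALoop]
  | cons k ks ih =>
      simp only [pvALoop]
      split
      · rename_i h
        simp only [Bool.or_eq_true, beq_iff_eq] at h
        constructor
        · intro _
          refine ⟨k, by simp, ?_⟩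
          rcases h with h | h
          · exact Or.inl h
          · right
            have := PySem.Chars.endswith_iff (s := hostname.toList) (p := ("." ++ k).toList)
            rw [PySem.Str.endswith_eq] at h
            have h2 := this.mp h
            simpa using h2
        · intro _; rfl
      · rename_i h
        simp only [Bool.or_eq_true, beq_iff_eq, not_or] at h
        rw [ih]
        constructor
        · rintro ⟨k', hk', hc⟩; exact ⟨k', by simp [hk'], hc⟩
        · rintro ⟨k', hk', hc⟩
          rcases List.mem_cons.mp hk' with rfl | hk'
          · exfalso
            rcases hc with rfl | hc
            · exact h.1 rfl
            · apply h.2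
              rw [PySem.Str.endswith_eq]
              rw [PySem.Chars.endswith_iff]
              simpa using hc
          · exact ⟨k', hk', hc⟩

theorem pvBLoop_iff (s : PySem.Set String) (l : List Char) :
    pvBLoop s l = true ↔
      ∃ p r, l = p ++ '.' :: r ∧ PySem.Set.contains s (String.ofList r) = true := by
  induction l with
  | nil =>
      simp only [pvBLoop]
      constructor
      · intro h; cases h
      · rintro ⟨p, r, hpr, _⟩
        exact absurd hpr (by simp)
  | cons c rest ih =>
      simp only [pvBLoop]
      split
      · rename_i h
        simp only [Bool.and_eq_true, beq_iff_eq] at h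
        constructor
        · intro _; exact ⟨[], rest, by simp [h.1], h.2⟩
        · intro _; rfl
      · rename_i h
        simp only [Bool.and_eq_true, beq_iff_eq, not_and] at h
        rw [ih]
        constructor
        · rintro ⟨p, r, hpr, hc⟩
          exact ⟨c :: p, r, by simp [hpr], hc⟩
        · rintro ⟨p, r, hpr, hc⟩
          cases p with
          | nil =>
              simp only [List.nil_append] at hpr
              injection hpr with h1 h2
              subst h1; subst h2
              exact absurd hc (h rfl)
          | cons c' p' =>
              simp only [List.cons_append, List.cons.injEq] at hpr
              exact ⟨p', r, hpr.2, hc⟩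

theorem pv_main (hostname : String) :
    is_known_http2_host hostname = is_known_http2_host_alt hostname := by
  unfold is_known_http2_host is_known_http2_host_alt
  rw [Bool.eq_iff_iff]
  rw [pvALoop_iff]
  constructor
  · rintro ⟨k, hk, rfl | ⟨p, hp⟩⟩
    · rw [if_pos]
      rw [PySem.Set.contains_iff]
      unfold pvHttp2Set
      rw [PySem.Set.mem_ofList]
      exact hk
    · split
      · rfl
      · rw [pvBLoop_iff]
        refine ⟨p, k.toList, hp.symm, ?_⟩
        rw [PySem.Set.contains_iff]
        unfold pvHttp2Set
        rw [PySem.Set.mem_ofList]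
        simpa using hk
  · intro h
    split at h
    · rename_i hc
      rw [PySem.Set.contains_iff] at hc
      unfold pvHttp2Set at hc
      rw [PySem.Set.mem_ofList] at hc
      exact ⟨hostname, hc, Or.inl rfl⟩
    · rw [pvBLoop_iff] at h
      obtain ⟨p, r, hpr, hc⟩ := h
      rw [PySem.Set.contains_iff] at hc
      unfold pvHttp2Set at hc
      rw [PySem.Set.mem_ofList] at hc
      refine ⟨String.ofList r, hc, Or.inr ⟨p, ?_⟩⟩
      simpa using hpr.symm

-- ===== VERDICT (by name: the statement is the Claim_ definition above) =====
theorem is_known_http2_host_spec : Claim_equal_is_known_http2_host := by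
  intro hostname _
  unfold Spec_is_known_http2_host
  exact pv_main hostname
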